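-- pv_equiv track=rewrite | github.com/avasserman/depaul-csc299-fall2023-search | ranking.py | term_count_relevance
-- ===== SOURCE A (Python) =====
-- def term_count_relevance(document: str, query: str) -> int:
--     query_terms = query.lower().split()
--     document_terms = document.lower().split()
--     count = 0
--     for term in query_terms:
--         for doc_term in document_terms:
--             if term == doc_term:
--                 count += 1
--     return count
-- ===== SOURCE B (Python) =====
-- def term_count_relevance(document: str, query: str) -> int:
--     doc_counts = {}
--     for t in document.lower().split():
--         doc_counts[t] = doc_counts.get(t, 0) + 1
--     query_counts = {}
--     for t in query.lower().split():
--         query_counts[t] = query_counts.get(t, 0) + 1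
--     return sum(qc * doc_counts.get(t, 0) for t, qc in query_counts.items())
-- ===== Notes on version B (the rewrite author's own statement) =====
-- stated objective: alternative
-- what changed: Replaces the nested pairwise scan over all query/document token pairs with two frequency tables built in one pass each, then a single loop over the distinct query terms summing query_count[t] * doc_count[t].
import Mathlib
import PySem

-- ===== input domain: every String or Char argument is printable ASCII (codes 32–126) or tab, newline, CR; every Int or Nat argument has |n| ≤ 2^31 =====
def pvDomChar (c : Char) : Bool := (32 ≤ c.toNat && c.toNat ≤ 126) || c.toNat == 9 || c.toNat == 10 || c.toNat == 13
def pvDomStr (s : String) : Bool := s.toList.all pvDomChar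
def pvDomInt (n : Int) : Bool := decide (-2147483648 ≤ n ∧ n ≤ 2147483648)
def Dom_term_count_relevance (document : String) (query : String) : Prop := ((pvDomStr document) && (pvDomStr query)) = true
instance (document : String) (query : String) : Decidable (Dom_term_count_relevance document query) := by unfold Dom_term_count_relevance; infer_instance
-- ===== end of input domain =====

-- B replaces A's nested pairwise scan with two frequency tables and one pass over the
-- distinct query terms (sum of query_count[t] * doc_count[t]); same result by a dot-product pass.

-- ===== PORT A =====
def term_count_relevance (document : String) (query : String) : Int :=
  let query_terms := PySem.Str.split₀ (PySem.Str.lower query)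
  let document_terms := PySem.Str.split₀ (PySem.Str.lower document)
  query_terms.foldl (fun count term =>
    document_terms.foldl (fun count doc_term =>
      if term == doc_term then count + 1 else count) count) 0

-- ===== PORT B =====
def term_count_relevance_alt (document : String) (query : String) : Int :=
  let doc_counts := (PySem.Str.split₀ (PySem.Str.lower document)).foldl
      (fun d t => d.insert t (d.getD t 0 + 1)) (PySem.Dict.empty : PySem.Dict String Int)
  let query_counts := (PySem.Str.split₀ (PySem.Str.lower query)).foldl
      (fun d t => d.insert t (d.getD t 0 + 1)) (PySem.Dict.empty : PySem.Dict String Int)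
  query_counts.items.foldl (fun acc p => acc + p.2 * doc_counts.getD p.1 0) 0

-- ===== PRECONDITION & SPEC =====
def Spec_term_count_relevance (document : String) (query : String) (out : Int) : Prop := out = term_count_relevance_alt document query
instance (document : String) (query : String) (out : Int) : Decidable (Spec_term_count_relevance document query out) := by unfold Spec_term_count_relevance; infer_instance

-- ===== CLAIM (what is proved, stated in full; the proofs are below) =====
def Claim_equal_term_count_relevance : Prop := ∀ (document : String) (query : String), Dom_term_count_relevance document query → Spec_term_count_relevance document query (term_count_relevance document query)

-- ===== LEMMAS AND PROOFS =====

-- A's inner loop counts occurrences of `term` in the document terms.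
lemma inner_loop_count (dts : List String) (term : String) (c : Int) :
    List.foldl (fun count doc_term => if term == doc_term then count + 1 else count) c dts
      = c + (dts.count term : Int) := by
  rw [PySem.List.foldl_count_if (fun d => term == d) dts c]
  congr 2
  rw [List.count_eq_countP]
  exact List.countP_congr (fun x _ => by simp only [beq_iff_eq]; exact eq_comm)

-- The nested-scan total equals the dot product of the two frequency vectors
-- over the distinct query terms.
lemma nested_eq_dot (qts dts : List String) :
    (qts.map (fun t => (dts.count t : Int))).sum
      = ((PySem.Set.ofList qts).map
          (fun k => (qts.count k : Int) * (dts.count k : Int))).sum := by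
  rw [Finset.sum_list_map_count qts (fun t => (dts.count t : Int))]
  rw [← List.sum_toFinset _ (PySem.Set.nodup_ofList qts)]
  have h : (PySem.Set.ofList qts).toFinset = qts.toFinset := by
    ext x; simp [List.mem_toFinset, PySem.Set.mem_ofList]
  rw [h]
  exact Finset.sum_congr rfl (fun m _ => by push_cast [nsmul_eq_mul]; ring)

-- Both loop shapes, stated over the two token lists.
lemma loops_eq (qts dts : List String) :
    qts.foldl (fun count term =>
        dts.foldl (fun count doc_term => if term == doc_term then count + 1 else count) count) 0
      = ((PySem.Set.ofList qts).map (fun k => (k, (qts.count k : Int)))).foldl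
          (fun acc p => acc + p.2 * (PySem.Dict.counter dts).getD p.1 0) 0 := by
  rw [show (fun (count : Int) term =>
      dts.foldl (fun count doc_term => if term == doc_term then count + 1 else count) count)
      = (fun (count : Int) term => count + (dts.count term : Int)) from
    funext fun c => funext fun t => inner_loop_count dts t c]
  rw [PySem.List.foldl_add qts (fun t => (dts.count t : Int)) 0, List.foldl_map]
  have h2 := PySem.List.foldl_add (PySem.Set.ofList qts)
      (fun k => (qts.count k : Int) * ((PySem.Dict.counter dts).getD k 0)) 0
  simp only [PySem.Dict.getD_counter] at h2 ⊢
  rw [h2]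
  simpa using nested_eq_dot qts dts

-- ===== VERDICT (by name: the statement is the Claim_ definition above) =====
theorem term_count_relevance_spec : Claim_equal_term_count_relevance := by
  intro document query _
  unfold Spec_term_count_relevance term_count_relevance term_count_relevance_alt
  simp only [PySem.Dict.foldl_insert_getD_add_one_eq_counter, PySem.Dict.items_counter]
  exact loops_eq (PySem.Str.split₀ (PySem.Str.lower query))
    (PySem.Str.split₀ (PySem.Str.lower document))
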